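-- pv_equiv track=rewrite | github.com/nicolascortegoso/pos-tagger-sranan-tongo | code/train_model.py | t_given_uv
-- ===== SOURCE A (Python) =====
-- def t_given_uv(t, u, v, train_bag):
--     tags = [pair[1] for pair in train_bag] 	#only tags are selected // выбераем только теги
--     count_uv = 0
--     count_t_uv = 0
--     for index in range(len(tags)-1):
--         if tags[index]==u and tags[index+1] == v:
--             count_uv += 1
--     for index in range(len(tags)-2):
--         if tags[index]==u and tags[index+1] == v and tags[index+2] == t:
--             count_t_uv += 1
--     return (count_t_uv, count_uv)
-- ===== SOURCE B (Python) =====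
-- def t_given_uv(t, u, v, train_bag):
--     # single pass: slide a two-tag window (prev2, prev1) over the tags,
--     # updating the bigram and trigram counts together
--     count_uv = 0
--     count_t_uv = 0
--     prev2 = None
--     prev1 = None
--     for _, tag in train_bag:
--         if prev1 == u and tag == v:
--             count_uv += 1
--         if prev2 == u and prev1 == v and tag == t:
--             count_t_uv += 1
--         prev2, prev1 = prev1, tag
--     return (count_t_uv, count_uv)
-- ===== Notes on version B (the rewrite author's own statement) =====
-- stated objective: alternative
-- what changed: Replaces the tag-list materialisation plus two separate index-based scans with a single pass over train_bag that maintains a sliding two-tag window and updates both counts together.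
import Mathlib
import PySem

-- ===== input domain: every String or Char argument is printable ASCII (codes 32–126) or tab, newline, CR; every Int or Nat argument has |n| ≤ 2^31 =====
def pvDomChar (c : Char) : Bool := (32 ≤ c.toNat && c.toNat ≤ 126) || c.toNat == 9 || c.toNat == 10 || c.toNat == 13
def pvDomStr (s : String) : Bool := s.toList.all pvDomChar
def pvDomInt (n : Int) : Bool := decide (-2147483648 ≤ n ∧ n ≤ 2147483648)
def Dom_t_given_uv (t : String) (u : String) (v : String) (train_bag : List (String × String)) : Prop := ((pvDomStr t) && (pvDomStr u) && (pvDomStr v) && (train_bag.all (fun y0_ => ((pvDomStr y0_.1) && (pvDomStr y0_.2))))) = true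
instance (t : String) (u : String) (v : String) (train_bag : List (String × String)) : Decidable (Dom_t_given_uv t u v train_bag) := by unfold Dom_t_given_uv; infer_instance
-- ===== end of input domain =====

-- B replaces the tag-list build plus two index-based scans with one pass over train_bag
-- maintaining a sliding two-tag window that updates both counts together (alternative).


-- ===== PORT A =====
-- range(len(tags)-1) is ported as List.range over Nat subtraction: exact, since Python's
-- range clamps a negative stop to empty just as Nat subtraction truncates at 0.
-- Indices produced by the range are always in bounds, so getD's default "" is never read.
def t_given_uv (t : String) (u : String) (v : String) (train_bag : List (String × String)) : Int × Int :=
  let tags := train_bag.map (fun pair => pair.2)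
  let count_uv : Int := (List.range (tags.length - 1)).foldl
    (fun c index => if tags.getD index "" = u ∧ tags.getD (index + 1) "" = v then c + 1 else c) 0
  let count_t_uv : Int := (List.range (tags.length - 2)).foldl
    (fun c index => if tags.getD index "" = u ∧ tags.getD (index + 1) "" = v ∧ tags.getD (index + 2) "" = t then c + 1 else c) 0
  (count_t_uv, count_uv)

-- ===== PORT B =====
-- state = (count_uv, count_t_uv, prev2, prev1); Python's None becomes Option.none, so
-- `prev1 == u` (None never equals a str) is exactly `prev1 = some u`.
def t_given_uv_alt (t : String) (u : String) (v : String) (train_bag : List (String × String)) : Int × Int :=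
  let r := train_bag.foldl
    (fun (st : Int × Int × Option String × Option String) pair =>
      (if st.2.2.2 = some u ∧ pair.2 = v then st.1 + 1 else st.1,
       if st.2.2.1 = some u ∧ st.2.2.2 = some v ∧ pair.2 = t then st.2.1 + 1 else st.2.1,
       st.2.2.2, some pair.2))
    (0, 0, none, none)
  (r.2.1, r.1)

-- ===== PRECONDITION & SPEC =====
def Spec_t_given_uv (t : String) (u : String) (v : String) (train_bag : List (String × String)) (out : Int × Int) : Prop := out = t_given_uv_alt t u v train_bag
instance (t : String) (u : String) (v : String) (train_bag : List (String × String)) (out : Int × Int) : Decidable (Spec_t_given_uv t u v train_bag out) := by unfold Spec_t_given_uv; infer_instance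

-- ===== CLAIM (what is proved, stated in full; the proofs are below) =====
def Claim_equal_t_given_uv : Prop := ∀ (t : String) (u : String) (v : String) (train_bag : List (String × String)), Dom_t_given_uv t u v train_bag → Spec_t_given_uv t u v train_bag (t_given_uv t u v train_bag)

-- ===== LEMMAS AND PROOFS =====

-- bigram count of a tag list, with the previous tag carried as an Option (B's window view)
def bi (u v : String) : Option String → List String → Int
  | _, [] => 0
  | p1, x :: xs => (if p1 = some u ∧ x = v then 1 else 0) + bi u v (some x) xs

-- trigram count, with the previous two tags carried as Options
def tri (t u v : String) : Option String → Option String → List String → Int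
  | _, _, [] => 0
  | p2, p1, x :: xs => (if p2 = some u ∧ p1 = some v ∧ x = t then 1 else 0) + tri t u v p1 (some x) xs

-- A's two loops, named so the proofs can speak about them (definitionally the port's lets)
def Acnt2 (u v : String) (tags : List String) : Int :=
  (List.range (tags.length - 1)).foldl
    (fun c index => if tags.getD index "" = u ∧ tags.getD (index + 1) "" = v then c + 1 else c) 0

def Acnt3 (t u v : String) (tags : List String) : Int :=
  (List.range (tags.length - 2)).foldl
    (fun c index => if tags.getD index "" = u ∧ tags.getD (index + 1) "" = v ∧ tags.getD (index + 2) "" = t then c + 1 else c) 0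

lemma foldl_ite_count (p : Nat → Prop) [DecidablePred p] (l : List Nat) (a : Int) :
    l.foldl (fun c i => if p i then c + 1 else c) a = a + (l.countP (fun i => decide (p i)) : Int) := by
  simpa using PySem.List.foldl_count_if (fun i => decide (p i)) l a

lemma Acnt2_eq (u v : String) : ∀ tags : List String, Acnt2 u v tags = bi u v none tags := by
  intro tags
  induction tags with
  | nil => simp [Acnt2, bi]
  | cons x xs ih =>
    cases xs with
    | nil => simp [Acnt2, bi]
    | cons y r =>
      unfold Acnt2 at ih ⊢
      simp only [List.length_cons, Nat.add_sub_cancel, List.range_succ_eq_map,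
        List.foldl_cons, List.foldl_map, List.getD_cons_succ, List.getD_cons_zero,
        Nat.succ_eq_add_one] at ih ⊢
      rw [foldl_ite_count] at ih ⊢
      simp [bi] at ih ⊢
      exact ih

lemma Acnt3_eq (t u v : String) : ∀ tags : List String, Acnt3 t u v tags = tri t u v none none tags := by
  intro tags
  induction tags with
  | nil => simp [Acnt3, tri]
  | cons x xs ih =>
    cases xs with
    | nil => simp [Acnt3, tri]
    | cons y r =>
      cases r with
      | nil => simp [Acnt3, tri]
      | cons z r' =>
        unfold Acnt3 at ih ⊢
        simp only [List.length_cons] at ih ⊢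
        rw [show r'.length + 1 + 1 + 1 - 2 = r'.length + 1 from by omega]
        rw [show r'.length + 1 + 1 - 2 = r'.length from by omega] at ih
        simp only [List.range_succ_eq_map, List.foldl_cons, List.foldl_map,
          List.getD_cons_succ, List.getD_cons_zero, Nat.succ_eq_add_one] at ih ⊢
        rw [foldl_ite_count] at ih ⊢
        simp [tri] at ih ⊢
        exact ih

lemma alt_loop (t u v : String) (l : List (String × String)) :
    ∀ (cuv ctuv : Int) (p2 p1 : Option String),
      (List.foldl
        (fun (st : Int × Int × Option String × Option String) pair =>
          (if st.2.2.2 = some u ∧ pair.2 = v then st.1 + 1 else st.1,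
           if st.2.2.1 = some u ∧ st.2.2.2 = some v ∧ pair.2 = t then st.2.1 + 1 else st.2.1,
           st.2.2.2, some pair.2)) (cuv, ctuv, p2, p1) l).1
        = cuv + bi u v p1 (l.map Prod.snd)
      ∧ (List.foldl
        (fun (st : Int × Int × Option String × Option String) pair =>
          (if st.2.2.2 = some u ∧ pair.2 = v then st.1 + 1 else st.1,
           if st.2.2.1 = some u ∧ st.2.2.2 = some v ∧ pair.2 = t then st.2.1 + 1 else st.2.1,
           st.2.2.2, some pair.2)) (cuv, ctuv, p2, p1) l).2.1
        = ctuv + tri t u v p2 p1 (l.map Prod.snd) := by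
  induction l with
  | nil => intro cuv ctuv p2 p1; simp [bi, tri]
  | cons a l ih =>
    intro cuv ctuv p2 p1
    simp only [List.foldl_cons, List.map_cons, bi, tri]
    obtain ⟨h1, h2⟩ := ih
      (if p1 = some u ∧ a.2 = v then cuv + 1 else cuv)
      (if p2 = some u ∧ p1 = some v ∧ a.2 = t then ctuv + 1 else ctuv)
      p1 (some a.2)
    constructor
    · rw [h1]; split_ifs <;> omega
    · rw [h2]; split_ifs <;> omega

-- ===== VERDICT (by name: the statement is the Claim_ definition above) =====
theorem t_given_uv_spec : Claim_equal_t_given_uv := by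
  intro t u v train_bag _
  show t_given_uv t u v train_bag = t_given_uv_alt t u v train_bag
  show (Acnt3 t u v (train_bag.map (fun pair => pair.2)),
        Acnt2 u v (train_bag.map (fun pair => pair.2))) = t_given_uv_alt t u v train_bag
  obtain ⟨h1, h2⟩ := alt_loop t u v train_bag 0 0 none none
  unfold t_given_uv_alt
  rw [Prod.ext_iff]
  refine ⟨?_, ?_⟩
  · simp only [h2, zero_add, Acnt3_eq]
  · simp only [h1, zero_add, Acnt2_eq]
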